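-- pv_equiv track=rewrite | github.com/dniminenn/isekaiprotocol | oracle/isekai_seasonal_oracle.py | determine_token_id_crystal
-- ===== SOURCE A (Python) =====
-- def determine_token_id_crystal(random_number):
--     """
--     Determines the ID of the token to be minted based on probabilities.
--     Probabilities reflect Crystals mint method, which are LP
--     farm rewards.
--
--     Args:
--         random_number (int): A random number between 0 and 10000.
--
--     Returns:
--         int: The ID of the token to be minted.
--     """
--     # minting odds are determined here
--     probabilities = [0, 0, 0, 2333, 2333, 2333, 833, 833, 833, 249, 249, 4]
--     current_sum = 0
--
--     for i, probability in enumerate(probabilities):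
--         current_sum += probability
--         if random_number < current_sum:
--             return i + 1
--     return 1
-- ===== SOURCE B (Python) =====
-- # Cumulative (prefix-sum) table of the minting probabilities, computed once.
-- # _PREFIX[i] = sum of probabilities[0..i] for
-- # probabilities = [0, 0, 0, 2333, 2333, 2333, 833, 833, 833, 249, 249, 4]
-- _PREFIX = [0, 0, 0, 2333, 4666, 6999, 7832, 8665, 9498, 9747, 9996, 10000]
--
--
-- def determine_token_id_crystal(random_number):
--     """Binary search for the first prefix-sum strictly above random_number."""
--     lo, hi = 0, len(_PREFIX)
--     while lo < hi:
--         mid = (lo + hi) // 2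
--         if _PREFIX[mid] <= random_number:
--             lo = mid + 1
--         else:
--             hi = mid
--     # lo is the first index with _PREFIX[lo] > random_number;
--     # if no bucket matches (random_number >= 10000) fall back to token 1.
--     return lo + 1 if lo < len(_PREFIX) else 1
-- ===== Notes on version B (the rewrite author's own statement) =====
-- stated objective: alternative
-- what changed: Replaces A's linear scan that accumulates probabilities on the fly with a binary search over a precomputed prefix-sum table (falling back to token 1 past the last bucket, as A does).
import Mathlib
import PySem

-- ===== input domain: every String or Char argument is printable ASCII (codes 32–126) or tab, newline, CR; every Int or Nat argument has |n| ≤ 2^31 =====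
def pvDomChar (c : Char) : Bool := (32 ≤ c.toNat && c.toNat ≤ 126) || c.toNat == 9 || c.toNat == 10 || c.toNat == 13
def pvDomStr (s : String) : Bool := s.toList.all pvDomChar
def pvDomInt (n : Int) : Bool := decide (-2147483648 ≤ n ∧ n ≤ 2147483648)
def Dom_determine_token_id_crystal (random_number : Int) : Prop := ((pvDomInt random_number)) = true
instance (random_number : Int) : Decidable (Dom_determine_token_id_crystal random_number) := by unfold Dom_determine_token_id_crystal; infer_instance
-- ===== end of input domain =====

-- B replaces A's linear cumulative-sum scan by a binary search over a precomputed
-- prefix-sum table (objective: alternative; same exact return value for every int).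

-- ===== PORT A =====
-- A's loop: for i, probability in enumerate(probabilities): current_sum += probability; early return i+1
def detA_loop (random_number : Int) : List (Int × Int) → Int → Int
  | [], _ => 1
  | (i, p) :: rest, current_sum =>
      let current_sum' := current_sum + p
      if random_number < current_sum' then i + 1
      else detA_loop random_number rest current_sum'

def determine_token_id_crystal (random_number : Int) : Int :=
  let probabilities : List Int := [0, 0, 0, 2333, 2333, 2333, 833, 833, 833, 249, 249, 4]
  detA_loop random_number (PySem.List.enumerate probabilities) 0

-- ===== PORT B =====
def detB_prefix : List Int := [0, 0, 0, 2333, 4666, 6999, 7832, 8665, 9498, 9747, 9996, 10000]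

-- Source B's while-loop, made total with a fuel counter (12 ≥ number of iterations)
def detB_loop (random_number : Int) : Nat → Nat → Nat → Nat
  | 0, lo, _ => lo
  | fuel + 1, lo, hi =>
      if lo < hi then
        let mid := (lo + hi) / 2
        if detB_prefix.getD mid 0 ≤ random_number then detB_loop random_number fuel (mid + 1) hi
        else detB_loop random_number fuel lo mid
      else lo

def determine_token_id_crystal_alt (random_number : Int) : Int :=
  let lo := detB_loop random_number 12 0 detB_prefix.length
  if lo < detB_prefix.length then (lo : Int) + 1 else 1

-- ===== PRECONDITION & SPEC =====
def Spec_determine_token_id_crystal (random_number : Int) (out : Int) : Prop := out = determine_token_id_crystal_alt random_number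
instance (random_number : Int) (out : Int) : Decidable (Spec_determine_token_id_crystal random_number out) := by unfold Spec_determine_token_id_crystal; infer_instance

-- ===== CLAIM (what is proved, stated in full; the proofs are below) =====
def Claim_equal_determine_token_id_crystal : Prop := ∀ (random_number : Int), Dom_determine_token_id_crystal random_number → Spec_determine_token_id_crystal random_number (determine_token_id_crystal random_number)

-- ===== LEMMAS AND PROOFS =====

-- ===== VERDICT (by name: the statement is the Claim_ definition above) =====
set_option maxHeartbeats 4000000 in
theorem determine_token_id_crystal_spec : Claim_equal_determine_token_id_crystal := by
  intro n _
  unfold Spec_determine_token_id_crystal determine_token_id_crystal determine_token_id_crystal_alt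
  simp [detA_loop, detB_loop, detB_prefix, PySem.List.enumerate_cons,
    PySem.List.enumerate_nil]
  split_ifs <;> omega
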